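-- pv_equiv track=rewrite | github.com/ben-saito/nocturnal-agent | src/nocturnal_agent/engines/pattern_extractor.py | _calculate_js_statistics
-- ===== SOURCE A (Python) =====
-- from typing import Any, Dict, List, Optional, Set, Tuple
--
-- def _calculate_js_statistics(content: str) -> Dict[str, int]:
--     """Calculate JavaScript file statistics."""
--     lines = content.split('\n')
--     return {
--         'line_count': len(lines),
--         'non_empty_lines': len([line for line in lines if line.strip()]),
--         'comment_lines': len([line for line in lines if line.strip().startswith('//')]),
--         'character_count': len(content)
--     }
-- ===== SOURCE B (Python) =====
-- def _calculate_js_statistics(content: str):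
--     """Calculate JavaScript file statistics with one character-level scan.
--
--     Instead of splitting into lines and stripping each line, run a small
--     automaton over the characters: per line, state 0 = only whitespace seen
--     so far, state 1 = first non-whitespace char was '/' (a second '/' makes
--     it a comment line), state 2 = line already classified.
--     """
--     newlines = 0
--     non_empty = 0
--     comments = 0
--     state = 0
--     for ch in content:
--         if ch == '\n':
--             newlines += 1
--             state = 0
--         elif state == 0:
--             if not ch.isspace():
--                 non_empty += 1
--                 state = 1 if ch == '/' else 2
--         elif state == 1:
--             if ch == '/':
--                 comments += 1
--             state = 2
--     return {
--         'line_count': newlines + 1,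
--         'non_empty_lines': non_empty,
--         'comment_lines': comments,
--         'character_count': len(content)
--     }
-- ===== Notes on version B (the rewrite author's own statement) =====
-- stated objective: alternative
-- what changed: Replaced A's split-into-lines plus three per-line list-comprehension scans (each stripping lines) by a single character-level automaton pass over the raw string that never materialises the line list or stripped strings: it counts newlines and classifies each line (blank / comment / other) from its first one or two non-whitespace characters.
import Mathlib
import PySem

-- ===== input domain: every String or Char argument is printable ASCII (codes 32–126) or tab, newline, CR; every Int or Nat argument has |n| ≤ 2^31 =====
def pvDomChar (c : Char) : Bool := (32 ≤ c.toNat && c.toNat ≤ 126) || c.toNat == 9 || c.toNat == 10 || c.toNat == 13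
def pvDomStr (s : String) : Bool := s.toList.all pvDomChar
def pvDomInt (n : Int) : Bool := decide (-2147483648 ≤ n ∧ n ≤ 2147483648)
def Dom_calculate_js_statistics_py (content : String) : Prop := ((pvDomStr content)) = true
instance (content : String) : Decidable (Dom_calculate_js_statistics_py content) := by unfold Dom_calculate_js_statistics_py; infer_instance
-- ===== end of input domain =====

-- B replaces A's line split + three per-line comprehension scans (with strip per line) by a single
-- character-level automaton pass over the raw string; same return value, objective: alternative.

-- ===== PORT A =====
def calculate_js_statistics_py (content : String) : List (String × Int) :=
  let lines := (PySem.Str.split? content "\n").getD []  -- split? is some: sep "\n" ≠ ""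
  [("line_count", (lines.length : Int)),
   ("non_empty_lines", ((lines.filter (fun line => PySem.Str.strip line != "")).length : Int)),
   ("comment_lines", ((lines.filter (fun line => PySem.Str.startswith (PySem.Str.strip line) "//")).length : Int)),
   ("character_count", PySem.Str.len content)]

-- ===== PORT B =====
-- the per-character automaton step of Source B's loop body (state: newlines, non_empty, comments, line state 0/1/2)
def jsStep (q : Int × Int × Int × Nat) (ch : Char) : Int × Int × Int × Nat :=
  if ch = '\n' then (q.1 + 1, q.2.1, q.2.2.1, 0)
  else if q.2.2.2 = 0 then
    (if ¬ PySem.Chars.isspace ch then (q.1, q.2.1 + 1, q.2.2.1, if ch = '/' then 1 else 2) else q)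
  else if q.2.2.2 = 1 then (q.1, q.2.1, (if ch = '/' then q.2.2.1 + 1 else q.2.2.1), 2)
  else q

def calculate_js_statistics_py_alt (content : String) : List (String × Int) :=
  let r := content.toList.foldl jsStep (0, 0, 0, 0)
  [("line_count", r.1 + 1),
   ("non_empty_lines", r.2.1),
   ("comment_lines", r.2.2.1),
   ("character_count", PySem.Str.len content)]

-- ===== PRECONDITION & SPEC =====
def Spec_calculate_js_statistics_py (content : String) (out : List (String × Int)) : Prop := out = calculate_js_statistics_py_alt content
instance (content : String) (out : List (String × Int)) : Decidable (Spec_calculate_js_statistics_py content out) := by unfold Spec_calculate_js_statistics_py; infer_instance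

-- ===== CLAIM =====
def Claim_equal_calculate_js_statistics_py : Prop := ∀ (content : String), Dom_calculate_js_statistics_py content → Spec_calculate_js_statistics_py content (calculate_js_statistics_py content)

-- ===== LEMMAS AND PROOFS =====

-- reference recursive specification of str.split('\n') on the char list
def splitNL : List Char → List (List Char)
  | [] => [[]]
  | c :: rest => if c = '\n' then [] :: splitNL rest else (splitNL rest).modifyHead (c :: ·)

-- the two per-line predicates A filters with, on the char-list side
def pNE (p : List Char) : Bool := !(PySem.Chars.strip p).isEmpty
def pCM (p : List Char) : Bool := PySem.Chars.startswith (PySem.Chars.strip p) ['/', '/']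

-- contribution of the (partially consumed) current line, given the automaton state
def cNE (st : Nat) (p : List Char) : Int := if st = 0 then (if pNE p then 1 else 0) else 0
def cCM (st : Nat) (p : List Char) : Int :=
  if st = 0 then (if pCM p then 1 else 0)
  else if st = 1 then (if p.head? = some '/' then 1 else 0) else 0

theorem modifyHead_fun_id {α : Type} (l : List α) : List.modifyHead (fun x => x) l = l := by
  cases l <;> simp

theorem splitNL_ne_nil (l : List Char) : splitNL l ≠ [] := by
  induction l with
  | nil => simp [splitNL]
  | cons c rest ih => simp only [splitNL]; split <;> simp [List.modifyHead_eq_nil_iff, ih]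

theorem go_spec (fuel : Nat) : ∀ (l : List Char), l.length < fuel → ∀ (cur : List Char) (accs : List (List Char)),
    PySem.Chars.splitOn.go ['\n'] fuel l cur accs = accs.reverse ++ (splitNL l).modifyHead (cur.reverse ++ ·) := by
  induction fuel with
  | zero => intro l h; omega
  | succ f ih =>
    intro l h cur accs
    cases l with
    | nil =>
      rw [PySem.Chars.splitOn.go]
      all_goals try omega
      all_goals simp [splitNL]
    | cons c rest =>
      rw [PySem.Chars.splitOn.go]
      by_cases hc : c = '\n'
      · subst hc
        have hpre : List.isPrefixOf ['\n'] ('\n' :: rest) = true := by simp [List.isPrefixOf]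
        simp only [hpre, if_pos, List.length_cons, List.drop_succ_cons, List.length_nil, List.drop_zero]
        rw [ih rest (by simpa using Nat.lt_of_succ_lt_succ h) [] (cur.reverse :: accs)]
        simp [splitNL, modifyHead_fun_id]
      · have hpre : List.isPrefixOf ['\n'] (c :: rest) = false := by
          simp [List.isPrefixOf]; exact fun h => hc h.symm
        simp only [hpre, Bool.false_eq_true, if_false]
        rw [ih rest (by simpa using Nat.lt_of_succ_lt_succ h) (c :: cur) accs]
        obtain ⟨h0, t0, hsp⟩ : ∃ h0 t0, splitNL rest = h0 :: t0 := by
          cases hsp : splitNL rest with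
          | nil => exact absurd hsp (splitNL_ne_nil rest)
          | cons a b => exact ⟨a, b, rfl⟩
        simp [splitNL, hc, hsp]

theorem splitOn_eq (l : List Char) : PySem.Chars.splitOn l ['\n'] = splitNL l := by
  rw [PySem.Chars.splitOn, go_spec (l.length + 1) l (by omega)]
  obtain ⟨h0, t0, hsp⟩ : ∃ h0 t0, splitNL l = h0 :: t0 := by
    cases hsp : splitNL l with
    | nil => exact absurd hsp (splitNL_ne_nil l)
    | cons a b => exact ⟨a, b, rfl⟩
  simp [hsp]

theorem rstrip_cons (c : Char) (p : List Char) :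
    PySem.Chars.rstrip (c :: p) =
      if PySem.Chars.rstrip p = [] then (if PySem.Chars.isspace c then [] else [c])
      else c :: PySem.Chars.rstrip p := by
  simp only [PySem.Chars.rstrip, List.reverse_cons, List.dropWhile_append]
  by_cases hp : (p.reverse.dropWhile PySem.Chars.isspace) = []
  · simp [hp, List.dropWhile]
    by_cases hc : PySem.Chars.isspace c <;> simp [hc]
  · simp [hp, List.isEmpty_iff, hp]

theorem strip_cons_ws {c : Char} (hc : PySem.Chars.isspace c = true) (p : List Char) :
    PySem.Chars.strip (c :: p) = PySem.Chars.strip p := by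
  simp [PySem.Chars.strip, PySem.Chars.lstrip, List.dropWhile_cons, hc]

theorem strip_cons_nonws {c : Char} (hc : ¬ PySem.Chars.isspace c = true) (p : List Char) :
    PySem.Chars.strip (c :: p) = c :: PySem.Chars.rstrip p := by
  simp only [PySem.Chars.strip, PySem.Chars.lstrip, List.dropWhile_cons, hc, Bool.false_eq_true, if_false]
  rw [rstrip_cons]
  by_cases h : PySem.Chars.rstrip p = [] <;> simp [h, hc]

theorem head?_rstrip_slash (p : List Char) :
    ((PySem.Chars.rstrip p).head? = some '/') ↔ (p.head? = some '/') := by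
  cases p with
  | nil => simp [PySem.Chars.rstrip]
  | cons c q =>
    rw [rstrip_cons]
    by_cases h : PySem.Chars.rstrip q = []
    · simp [h]
      by_cases hc : PySem.Chars.isspace c <;> simp [hc]
      intro hcs
      subst hcs
      exact absurd hc (by decide)
    · simp [h]

theorem sw2 (q : List Char) :
    PySem.Chars.startswith ('/' :: q) ['/', '/'] = decide (q.head? = some '/') := by
  cases q with
  | nil => simp [PySem.Chars.startswith, List.isPrefixOf]
  | cons a q' =>
    simp only [PySem.Chars.startswith, List.isPrefixOf, List.isPrefixOf_nil_left, Bool.and_true]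
    by_cases ha : a = '/' <;> simp [ha] <;> exact fun h => absurd h.symm ha

theorem sw_ne {c : Char} (hc : c ≠ '/') (q : List Char) :
    PySem.Chars.startswith (c :: q) ['/', '/'] = false := by
  simp [PySem.Chars.startswith, List.isPrefixOf]
  exact fun h => absurd h.symm hc

theorem fold_spec (l : List Char) : ∀ (st : Nat), st ≤ 2 → ∀ (nl ne cm : Int) (h : List Char) (t : List (List Char)),
    splitNL l = h :: t → ∃ st' : Nat,
    l.foldl jsStep (nl, ne, cm, st) =
      (nl + (1 + t.length : Int) - 1,
       ne + cNE st h + (t.countP pNE : Int),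
       cm + cCM st h + (t.countP pCM : Int),
       st') := by
  induction l with
  | nil =>
    intro st hst nl ne cm h t hsp
    simp only [splitNL] at hsp
    injection hsp.symm with hh ht
    subst hh; subst ht
    refine ⟨st, ?_⟩
    simp [cNE, cCM, pNE, pCM, PySem.Chars.strip, PySem.Chars.lstrip, PySem.Chars.rstrip, PySem.Chars.startswith, List.isPrefixOf, Prod.ext_iff]
  | cons c rest ih =>
    intro st hst nl ne cm h t hsp
    obtain ⟨h0, t0, hsp0⟩ : ∃ h0 t0, splitNL rest = h0 :: t0 := by
      cases hsp0 : splitNL rest with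
      | nil => exact absurd hsp0 (splitNL_ne_nil rest)
      | cons a b => exact ⟨a, b, rfl⟩
    by_cases hc : c = '\n'
    · subst hc
      simp only [splitNL, if_pos] at hsp
      injection hsp with hh ht
      subst hh
      rw [hsp0] at ht
      subst ht
      obtain ⟨st', heq⟩ := ih 0 (by omega) (nl + 1) ne cm h0 t0 hsp0
      refine ⟨st', ?_⟩
      simp only [List.foldl_cons, jsStep, if_pos]
      rw [heq]
      have hne : pNE [] = false := by decide
      have hcm0 : pCM [] = false := by decide
      have hh0 : ([] : List Char).head? = none := rfl
      simp [Prod.ext_iff, cNE, cCM, hne, hcm0, List.countP_cons]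
      refine ⟨by push_cast; omega, ?_, ?_⟩
      · by_cases hp : pNE h0 <;> simp [hp] <;> push_cast <;> omega
      · by_cases hp : pCM h0 <;> simp [hp] <;> push_cast <;> omega
    · -- c is not a newline: first piece of splitNL (c :: rest) is c :: h0, tail unchanged
      simp only [splitNL, if_neg hc, hsp0, List.modifyHead] at hsp
      injection hsp with hh ht
      subst hh
      subst ht
      interval_cases st
      · by_cases hws : PySem.Chars.isspace c
        · obtain ⟨st', heq⟩ := ih 0 (by omega) nl ne cm h0 t0 hsp0
          refine ⟨st', ?_⟩
          have hstep : jsStep (nl, ne, cm, 0) c = (nl, ne, cm, 0) := by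
            simp [jsStep, hc, hws]
          simp only [List.foldl_cons, hstep]
          rw [heq]
          simp [Prod.ext_iff, cNE, cCM, pNE, pCM, strip_cons_ws hws]
        · by_cases hsl : c = '/'
          · subst hsl
            obtain ⟨st', heq⟩ := ih 1 (by omega) nl (ne + 1) cm h0 t0 hsp0
            refine ⟨st', ?_⟩
            have hstep : jsStep (nl, ne, cm, 0) '/' = (nl, ne + 1, cm, 1) := by
              simp [jsStep, hc, hws]
            simp only [List.foldl_cons, hstep]
            rw [heq]
            have h1 : pNE ('/' :: h0) = true := by
              simp [pNE, strip_cons_nonws hws]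
            have h2 : pCM ('/' :: h0) = decide (h0.head? = some '/') := by
              rw [pCM, strip_cons_nonws hws, sw2]
              simp [head?_rstrip_slash]
            simp [Prod.ext_iff, cNE, cCM, h1, h2]
          · obtain ⟨st', heq⟩ := ih 2 (by omega) nl (ne + 1) cm h0 t0 hsp0
            refine ⟨st', ?_⟩
            have hstep : jsStep (nl, ne, cm, 0) c = (nl, ne + 1, cm, 2) := by
              simp [jsStep, hc, hws, hsl]
            simp only [List.foldl_cons, hstep]
            rw [heq]
            have h1 : pNE (c :: h0) = true := by
              simp [pNE, strip_cons_nonws hws]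
            have h2 : pCM (c :: h0) = false := by
              rw [pCM, strip_cons_nonws hws, sw_ne hsl]
            simp [Prod.ext_iff, cNE, cCM, h1, h2]
      · obtain ⟨st', heq⟩ := ih 2 (by omega) nl ne (if c = '/' then cm + 1 else cm) h0 t0 hsp0
        refine ⟨st', ?_⟩
        have hstep : jsStep (nl, ne, cm, 1) c = (nl, ne, (if c = '/' then cm + 1 else cm), 2) := by
          simp [jsStep, hc]
        simp only [List.foldl_cons, hstep]
        rw [heq]
        simp [Prod.ext_iff, cNE, cCM]
        by_cases hp : c = '/' <;> simp [hp] <;> omega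
      · obtain ⟨st', heq⟩ := ih 2 (by omega) nl ne cm h0 t0 hsp0
        refine ⟨st', ?_⟩
        have hstep : jsStep (nl, ne, cm, 2) c = (nl, ne, cm, 2) := by
          simp [jsStep, hc]
        simp only [List.foldl_cons, hstep]
        rw [heq]
        simp [Prod.ext_iff, cNE, cCM]

theorem predNE_eq (p : List Char) :
    (PySem.Str.strip (String.ofList p) != "") = pNE p := by
  rw [pNE]
  simp only [PySem.Str.strip, String.toList_ofList]
  rw [show ("" : String) = String.ofList [] from rfl]
  simp only [bne]
  congr 1
  rw [Bool.eq_iff_iff, beq_iff_eq, String.ofList_inj, List.isEmpty_iff]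

theorem predCM_eq (p : List Char) :
    (PySem.Str.startswith (PySem.Str.strip (String.ofList p)) "//") = pCM p := by
  rw [pCM]
  simp [PySem.Str.startswith, PySem.Str.strip]

theorem split_lines (content : String) :
    (PySem.Str.split? content "\n").getD [] = (splitNL content.toList).map String.ofList := by
  simp [PySem.Str.split?, PySem.Chars.split?, splitOn_eq]

-- ===== VERDICT =====
set_option maxHeartbeats 1000000 in
theorem calculate_js_statistics_py_spec : Claim_equal_calculate_js_statistics_py := by
  intro content _
  unfold Spec_calculate_js_statistics_py
  show calculate_js_statistics_py content = calculate_js_statistics_py_alt content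
  obtain ⟨h0, t0, hsp0⟩ : ∃ h0 t0, splitNL content.toList = h0 :: t0 := by
    cases hsp0 : splitNL content.toList with
    | nil => exact absurd hsp0 (splitNL_ne_nil content.toList)
    | cons a b => exact ⟨a, b, rfl⟩
  obtain ⟨st', heq⟩ := fold_spec content.toList 0 (by omega) 0 0 0 h0 t0 hsp0
  simp only [calculate_js_statistics_py, calculate_js_statistics_py_alt, split_lines, heq, hsp0]
  have hNE : ∀ q : List (List Char),
      (q.filter (fun p => PySem.Str.strip (String.ofList p) != "")).length = q.countP pNE := by
    intro q
    rw [List.countP_eq_length_filter]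
    congr 1
    exact List.filter_congr (fun p _ => predNE_eq p)
  have hCM : ∀ q : List (List Char),
      (q.filter (fun p => PySem.Str.startswith (PySem.Str.strip (String.ofList p)) "//")).length = q.countP pCM := by
    intro q
    rw [List.countP_eq_length_filter]
    congr 1
    exact List.filter_congr (fun p _ => predCM_eq p)
  simp only [List.filter_map, List.length_map, Function.comp_def]
  rw [hNE, hCM]
  simp only [List.cons.injEq, Prod.mk.injEq, List.length_cons, List.countP_cons, true_and, and_true]
  refine ⟨?_, ?_, ?_⟩
  · push_cast; ring
  · simp only [cNE, if_pos rfl]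
    by_cases hp : pNE h0 <;> simp [hp] <;> push_cast <;> omega
  · simp only [cCM, if_pos rfl]
    by_cases hp : pCM h0 <;> simp [hp] <;> push_cast <;> omega
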